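-- pv_equiv track=rewrite | github.com/asero13th/codeforces-contest | future-tourists-8/B_File_Name.py | solve
-- ===== SOURCE A (Python) =====
-- def solve(nums):
--
--
--     j = 0
--     ans = 0
--     for i in range(len(nums)):
--         if nums[i] == "x" and (i - j + 1) > 2:
--             ans += 1
--
--         elif nums[i] != "x":
--             j = i + 1
--
--     return ans
-- ===== SOURCE B (Python) =====
-- def solve(nums):
--     # Count overlapping "xxx" windows: a length-3 sliding window of all 'x's
--     # is exactly one excess 'x' beyond the first two of its run.
--     return sum(1 for a, b, c in zip(nums, nums[1:], nums[2:]) if a == b == c == "x")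
-- ===== Notes on version B (the rewrite author's own statement) =====
-- stated objective: simpler
-- what changed: Replaces the stateful scan (j-reset index bookkeeping with per-character run-length test i-j+1>2) by a stateless sliding-window characterization: the answer equals the number of length-3 all-'x' windows, counted by zipping the string with its two shifts.
import Mathlib
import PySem

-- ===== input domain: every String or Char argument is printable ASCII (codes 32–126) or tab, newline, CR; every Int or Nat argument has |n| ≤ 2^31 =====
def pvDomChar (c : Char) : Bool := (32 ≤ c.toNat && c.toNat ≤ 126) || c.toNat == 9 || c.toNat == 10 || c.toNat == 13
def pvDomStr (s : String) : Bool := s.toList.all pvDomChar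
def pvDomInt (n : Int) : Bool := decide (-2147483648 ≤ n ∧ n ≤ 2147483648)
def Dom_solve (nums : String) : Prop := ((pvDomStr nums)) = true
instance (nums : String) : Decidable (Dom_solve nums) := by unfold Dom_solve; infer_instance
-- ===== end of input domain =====

-- B replaces A's stateful index/j-reset scan by a stateless count of overlapping "xxx" windows via a zip of the string with its two shifts (simpler decomposition; same cost).


-- ===== PORT A =====
-- `for i in range(len(nums))` with `nums[i]`: iterate over the indexed characters.
def pvEnumFrom (k : Nat) : List Char → List (Nat × Char)
  | [] => []
  | c :: cs => (k, c) :: pvEnumFrom (k + 1) cs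

-- the loop body of A, state (j, ans)
def solveLoop : List (Nat × Char) → Int → Int → Int
  | [], _, ans => ans
  | (i, c) :: rest, j, ans =>
    if c = 'x' ∧ (i : Int) - j + 1 > 2 then solveLoop rest j (ans + 1)
    else if c ≠ 'x' then solveLoop rest ((i : Int) + 1) ans
    else solveLoop rest j ans

def solve (nums : String) : Int :=
  solveLoop (pvEnumFrom 0 nums.toList) 0 0

-- ===== PORT B =====
-- zip(nums, nums[1:], nums[2:]): the slices are ported as List.drop (exact for a nonnegative start); sum of the generator = countP of the zipped triples.
def solve_alt (nums : String) : Int :=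
  ((nums.toList.zip ((nums.toList.drop 1).zip (nums.toList.drop 2))).countP
    (fun t => t.1 = 'x' && t.2.1 = 'x' && t.2.2 = 'x') : Nat)

-- ===== PRECONDITION & SPEC =====
def Spec_solve (nums : String) (out : Int) : Prop := out = solve_alt nums
instance (nums : String) (out : Int) : Decidable (Spec_solve nums out) := by unfold Spec_solve; infer_instance

-- ===== CLAIM (what is proved, stated in full; the proofs are below) =====
def Claim_equal_solve : Prop := ∀ (nums : String), Dom_solve nums → Spec_solve nums (solve nums)

-- ===== LEMMAS AND PROOFS =====

-- Z l = the value solve_alt computes on a list (the overlapping-"xxx" window count).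
def Z (l : List Char) : Int :=
  ((l.zip ((l.drop 1).zip (l.drop 2))).countP
    (fun t => t.1 = 'x' && t.2.1 = 'x' && t.2.2 = 'x') : Nat)

-- bridge: windows counted by their END, with state r = number of immediately preceding 'x's, capped at 2
def cnt : List Char → Nat → Int
  | [], _ => 0
  | c :: rest, r => if c = 'x' then (if 2 ≤ r then (1:Int) else 0) + cnt rest (min (r+1) 2) else cnt rest 0

theorem Z_nil : Z [] = 0 := by decide
theorem Z_one (a : Char) : Z [a] = 0 := by simp [Z]
theorem Z_two (a b : Char) : Z [a, b] = 0 := by simp [Z]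

theorem Z_cons3 (a b c : Char) (t : List Char) :
    Z (a :: b :: c :: t) = (if a = 'x' ∧ b = 'x' ∧ c = 'x' then 1 else 0) + Z (b :: c :: t) := by
  simp only [Z, List.drop, List.zip, List.zipWith, List.countP_cons]
  by_cases h : a = 'x' ∧ b = 'x' ∧ c = 'x'
  · rcases h with ⟨h1, h2, h3⟩
    simp [h1, h2, h3]
    ring
  · rw [if_neg h]
    have hb : (decide (a = 'x') && decide (b = 'x') && decide (c = 'x')) = false := by
      by_contra hb
      simp only [Bool.not_eq_false, Bool.and_eq_true, decide_eq_true_eq] at hb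
      exact h ⟨hb.1.1, hb.1.2, hb.2⟩
    simp [hb]

-- A's loop with run-length invariant: j = k - r (r = current run of 'x's), counting via cnt with the capped state
theorem loopA (l : List Char) (k r : Nat) (ans : Int) :
    solveLoop (pvEnumFrom k l) ((k : Int) - r) ans = ans + cnt l (min r 2) := by
  induction l generalizing k r ans with
  | nil => simp [pvEnumFrom, solveLoop, cnt]
  | cons c rest ih =>
    simp only [pvEnumFrom, solveLoop, cnt]
    by_cases hx : c = 'x'
    · have hcond : ((k : Int) - ((k : Int) - r) + 1 > 2) ↔ 2 ≤ r := by omega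
      by_cases hr : 2 ≤ r
      · rw [if_pos ⟨hx, hcond.mpr hr⟩, if_pos hx, if_pos (by omega : 2 ≤ min r 2)]
        have e1 : (k : Int) - r = ((k + 1 : Nat) : Int) - ((r + 1 : Nat) : Int) := by push_cast; ring
        have e2 : min (min r 2 + 1) 2 = min (r + 1) 2 := by omega
        rw [e1, ih, e2]; ring
      · rw [if_neg (by rintro ⟨_, h⟩; exact hr (hcond.mp h)), if_neg (by simp [hx]),
            if_pos hx, if_neg (by omega : ¬ 2 ≤ min r 2)]
        have e1 : (k : Int) - r = ((k + 1 : Nat) : Int) - ((r + 1 : Nat) : Int) := by push_cast; ring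
        have e2 : min (min r 2 + 1) 2 = min (r + 1) 2 := by omega
        rw [e1, ih, e2]; ring
    · rw [if_neg (by rintro ⟨h, _⟩; exact hx h), if_pos (by simp [hx]), if_neg hx]
      have := ih (k + 1) 0 ans
      simpa using this

-- peeling lemmas for Z when a window fails
theorem Z_peel (c : Char) (hc : c ≠ 'x') (rest : List Char) : Z (c :: rest) = Z rest := by
  match rest with
  | [] => simp [Z]
  | [b] => simp [Z]
  | b :: d :: t => rw [Z_cons3, if_neg (by rintro ⟨h, _⟩; exact hc h)]; ring

theorem Z_peel2 (c : Char) (hc : c ≠ 'x') (rest : List Char) :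
    Z ('x' :: c :: rest) = Z (c :: rest) := by
  match rest with
  | [] => simp [Z]
  | d :: t => rw [Z_cons3, if_neg (by rintro ⟨_, h, _⟩; exact hc h)]; ring

theorem Z_peel3 (c : Char) (hc : c ≠ 'x') (rest : List Char) :
    Z ('x' :: 'x' :: c :: rest) = Z ('x' :: c :: rest) := by
  rw [Z_cons3, if_neg (by rintro ⟨_, _, h⟩; exact hc h)]; ring

-- cnt with s preceding 'x's equals Z with s 'x's prepended
theorem cnt_eq_Z (l : List Char) (s : Nat) (hs : s ≤ 2) :
    cnt l s = Z (List.replicate s 'x' ++ l) := by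
  induction l generalizing s with
  | nil =>
    interval_cases s <;> simp [cnt, Z_nil, Z_one, Z_two, List.replicate]
  | cons c rest ih =>
    by_cases hx : c = 'x'
    · subst hx
      interval_cases s
      · simpa [cnt] using ih 1 (by omega)
      · simpa [cnt, List.replicate] using ih 2 (by omega)
      · have e : min (2 + 1) 2 = 2 := by omega
        simp only [cnt, e]
        rw [ih 2 (by omega)]
        have : (List.replicate 2 'x' ++ 'x' :: rest : List Char) = 'x' :: 'x' :: 'x' :: rest := by
          simp [List.replicate]
        rw [this, Z_cons3]
        simp [List.replicate]
    · simp only [cnt, if_neg hx]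
      rw [ih 0 (by omega)]
      interval_cases s <;>
        simp only [List.replicate, List.cons_append, List.nil_append]
      · rw [Z_peel c hx]
      · rw [Z_peel2 c hx, Z_peel c hx]
      · rw [Z_peel3 c hx, Z_peel2 c hx, Z_peel c hx]

-- ===== VERDICT (by name: the statement is the Claim_ definition above) =====
theorem solve_spec : Claim_equal_solve := by
  intro nums _
  unfold Spec_solve solve solve_alt
  have h := loopA nums.toList 0 0 0
  rw [cnt_eq_Z _ _ (by omega)] at h
  simpa [Z] using h
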